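-- pv_equiv track=rewrite | github.com/artfhc/project-github-cronjob | src/py/fix_csv.py | fix_quoted_newlines
-- ===== SOURCE A (Python) =====
-- def fix_quoted_newlines(content: str) -> str:
--     """
--     Replace literal newlines within quoted CSV fields with escaped newlines.
--
--     This handles the case where CSV fields contain actual newline characters
--     within double quotes, which breaks CSV parsing.
--     """
--     result = []
--     in_quotes = False
--     i = 0
--
--     while i < len(content):
--         char = content[i]
--
--         if char == '"':
--             # Handle escaped quotes ("")
--             if i + 1 < len(content) and content[i + 1] == '"' and in_quotes:
--                 result.append('""')  # Keep escaped quotes as-is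
--                 i += 2
--                 continue
--             else:
--                 in_quotes = not in_quotes
--                 result.append(char)
--         elif char == '\n' and in_quotes:
--             # Replace newline with escaped newline when inside quotes
--             result.append('\\n')
--         elif char == '\r' and in_quotes:
--             # Also handle carriage returns
--             result.append('\\r')
--         else:
--             result.append(char)
--
--         i += 1
--
--     return ''.join(result)
-- ===== SOURCE B (Python) =====
-- def fix_quoted_newlines(content: str) -> str:
--     """Split on '"' and walk the parts with a quote state, escaping newlines
--     only in parts that lie inside quotes (a '' part inside quotes is a literal "")."""
--     def esc(s):
--         return ''.join('\\n' if c == '\n' else '\\r' if c == '\r' else c for c in s)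
--     parts = content.split('"')
--     m = len(parts) - 1
--     out = [parts[0]]
--     in_q = False
--     j = 1
--     while j <= m:
--         if not in_q:
--             out.append('"' + esc(parts[j]))
--             in_q = True
--             j += 1
--         elif parts[j] == '' and j < m:
--             out.append('""' + esc(parts[j + 1]))
--             j += 2
--         else:
--             out.append('"' + parts[j])
--             in_q = False
--             j += 1
--     return ''.join(out)
-- ===== Notes on version B (the rewrite author's own statement) =====
-- stated objective: faster
-- what changed: Replaces A's per-character scan with an in_quotes flag by splitting the string once on the double-quote character and running a small state machine over the parts, escaping newlines only in parts that lie inside quotes (an empty part inside quotes is a literal doubled quote).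
import Mathlib
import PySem

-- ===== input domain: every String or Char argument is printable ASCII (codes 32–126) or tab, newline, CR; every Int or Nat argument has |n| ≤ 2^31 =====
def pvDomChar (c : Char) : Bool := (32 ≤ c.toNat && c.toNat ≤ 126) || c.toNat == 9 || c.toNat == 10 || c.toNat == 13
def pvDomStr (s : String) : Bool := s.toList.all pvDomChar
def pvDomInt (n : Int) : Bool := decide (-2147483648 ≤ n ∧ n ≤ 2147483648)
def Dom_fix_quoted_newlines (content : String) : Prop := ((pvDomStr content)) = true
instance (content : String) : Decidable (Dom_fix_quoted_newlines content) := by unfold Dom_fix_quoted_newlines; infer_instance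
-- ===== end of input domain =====

-- B replaces A's per-character in_quotes state machine by one split on the double-quote
-- character plus a state machine over the parts, escaping newlines only in parts inside
-- quotes (measurably faster: the scanning moves into str.split/str.join).

-- ===== PORT A =====
-- character loop with an in_quotes flag; the i+1 lookahead of A is rest.head?
def pvFixA (l : List Char) (inq : Bool) : List Char :=
  match l with
  | [] => []
  | c :: rest =>
    if c = '"' then
      if rest.head? = some '"' ∧ inq = true then
        '"' :: '"' :: pvFixA rest.tail true
      else
        '"' :: pvFixA rest (!inq)
    else if c = '\n' ∧ inq = true then
      '\\' :: 'n' :: pvFixA rest inq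
    else if c = '\r' ∧ inq = true then
      '\\' :: 'r' :: pvFixA rest inq
    else
      c :: pvFixA rest inq
termination_by l.length
decreasing_by all_goals (simp [List.length_tail]; try omega)

def fix_quoted_newlines (content : String) : String :=
  String.ofList (pvFixA content.toList false)

-- ===== PORT B =====
-- esc(s) of Source B: the '\\n'/'\\r' substitution genexp, character-wise
def pvEsc (s : List Char) : List Char :=
  s.flatMap (fun c => if c = '\n' then ['\\', 'n'] else if c = '\r' then ['\\', 'r'] else [c])

-- the while loop of Source B over parts[1:], with the in_q flag; 'j < m' is rest ≠ []
def pvGoB (inq : Bool) (parts : List (List Char)) : List Char :=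
  match inq, parts with
  | _, [] => []
  | false, p :: rest => '"' :: (pvEsc p ++ pvGoB true rest)
  | true, p :: rest =>
    if p = [] ∧ rest ≠ [] then
      '"' :: '"' :: (pvEsc rest.head! ++ pvGoB true rest.tail)
    else
      '"' :: (p ++ pvGoB false rest)
termination_by parts.length
decreasing_by all_goals (simp [List.length_tail]; try omega)

def fix_quoted_newlines_alt (content : String) : String :=
  match PySem.Chars.splitOn content.toList ['"'] with
  | [] => ""  -- unreachable: split always returns at least one part
  | p0 :: rest => String.ofList (p0 ++ pvGoB false rest)

-- ===== PRECONDITION & SPEC =====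
def Spec_fix_quoted_newlines (content : String) (out : String) : Prop := out = fix_quoted_newlines_alt content
instance (content : String) (out : String) : Decidable (Spec_fix_quoted_newlines content out) := by unfold Spec_fix_quoted_newlines; infer_instance

-- ===== CLAIM (what is proved, stated in full; the proofs are below) =====
def Claim_equal_fix_quoted_newlines : Prop := ∀ (content : String), Dom_fix_quoted_newlines content → Spec_fix_quoted_newlines content (fix_quoted_newlines content)

-- ===== LEMMAS AND PROOFS =====

-- proof-side simple recursive form of split-on-'"'
def sp : List Char → List (List Char)
  | [] => [[]]
  | c :: rest =>
    if c = '"' then [] :: sp rest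
    else
      match sp rest with
      | [] => [[c]]
      | p :: ps => (c :: p) :: ps

lemma sp_ne_nil (l : List Char) : sp l ≠ [] := by
  cases l with
  | nil => simp [sp]
  | cons c rest =>
    simp only [sp]
    split
    · simp
    · split <;> simp

lemma sp_cons (l : List Char) : sp l = (sp l).head! :: (sp l).tail := by
  cases h : sp l with
  | nil => exact absurd h (sp_ne_nil l)
  | cons p ps => simp

lemma sp_head_nil (l : List Char) (h : (sp l).head! = []) (ht : (sp l).tail ≠ []) :
    l.head? = some '"' := by
  cases l with
  | nil => simp [sp] at ht
  | cons c rest =>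
    by_cases hc : c = '"'
    · simp [hc]
    · exfalso
      simp only [sp, if_neg hc] at h ht
      rcases hsp : sp rest with _ | ⟨p, ps⟩ <;> simp [hsp] at h ht

lemma go_sp (fuel : Nat) : ∀ (l cur : List Char) (acc : List (List Char)),
    l.length ≤ fuel →
    PySem.Chars.splitOn.go ['"'] fuel l cur acc
      = acc.reverse ++ (cur.reverse ++ (sp l).head!) :: (sp l).tail := by
  induction fuel with
  | zero =>
    intro l cur acc hl
    have : l = [] := by cases l <;> simp_all
    subst this
    simp [PySem.Chars.splitOn.go, sp]
  | succ f ih =>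
    intro l cur acc hl
    cases l with
    | nil => simp [PySem.Chars.splitOn.go, sp]
    | cons c rest =>
      by_cases hc : c = '"'
      · subst hc
        have hpre : List.isPrefixOf ['"'] ('"' :: rest) = true := by simp [List.isPrefixOf]
        rw [PySem.Chars.splitOn.go]
        simp only [hpre, if_true]
        rw [show List.drop ['"'].length ('"' :: rest) = rest from rfl]
        rw [ih rest [] _ (by simpa using Nat.le_of_succ_le_succ hl)]
        rw [show sp ('"' :: rest) = [] :: sp rest by rw [sp.eq_def]; simp]
        rw [sp_cons rest]
        simp
      · have hpre : List.isPrefixOf ['"'] (c :: rest) = false := by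
          simp [List.isPrefixOf]; intro h; exact absurd h.symm hc
        rw [PySem.Chars.splitOn.go]
        simp only [hpre, Bool.false_eq_true, if_false]
        rw [ih rest (c :: cur) _ (by simpa using Nat.le_of_succ_le_succ hl)]
        simp only [sp, if_neg hc]
        rcases hsp : sp rest with _ | ⟨p, ps⟩
        · exact absurd hsp (sp_ne_nil rest)
        · simp

lemma splitOn_eq_sp (l : List Char) : PySem.Chars.splitOn l ['"'] = sp l := by
  rw [PySem.Chars.splitOn, go_sp (l.length + 1) l [] [] (by omega)]
  simpa using (sp_cons l).symm

-- step lemmas for sp and B's loop (branch-by-branch reductions of the matches)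
lemma sp_quote (rest : List Char) : sp ('"' :: rest) = [] :: sp rest := by
  rw [sp.eq_def]; simp

lemma sp_other (c : Char) (rest : List Char) (hc : ¬c = '"') :
    sp (c :: rest) = (c :: (sp rest).head!) :: (sp rest).tail := by
  conv_lhs => rw [sp.eq_def]
  simp only [if_neg hc]
  rcases hsp : sp rest with _ | ⟨p, ps⟩
  · exact absurd hsp (sp_ne_nil rest)
  · simp

lemma goB_nil (inq : Bool) : pvGoB inq [] = [] := by rw [pvGoB.eq_def]

lemma goB_false (p : List Char) (rest : List (List Char)) :
    pvGoB false (p :: rest) = '"' :: (pvEsc p ++ pvGoB true rest) := by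
  rw [pvGoB.eq_def]

lemma goB_true_pair (rest : List (List Char)) (h : rest ≠ []) :
    pvGoB true ([] :: rest) = '"' :: '"' :: (pvEsc rest.head! ++ pvGoB true rest.tail) := by
  rw [pvGoB.eq_def]; simp [h]

lemma goB_true_close (p : List Char) (rest : List (List Char))
    (h : ¬(p = [] ∧ rest ≠ [])) :
    pvGoB true (p :: rest) = '"' :: (p ++ pvGoB false rest) := by
  rw [pvGoB.eq_def]; simp [h]

lemma pvEsc_cons (c : Char) (p : List Char) :
    pvEsc (c :: p)
      = (if c = '\n' then ['\\', 'n'] else if c = '\r' then ['\\', 'r'] else [c]) ++ pvEsc p := by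
  simp only [pvEsc, List.flatMap_cons]

lemma fixA_eq_goB (l : List Char) (inq : Bool) :
    pvFixA l inq
      = (if inq then pvEsc (sp l).head! else (sp l).head!) ++ pvGoB inq (sp l).tail := by
  fun_induction pvFixA l inq with
  | case1 inq => cases inq <;> simp [sp, goB_nil, pvEsc]
  | case2 inq rest hpair ih =>
    obtain ⟨hhd, hinq⟩ := hpair
    subst hinq
    cases rest with
    | nil => simp at hhd
    | cons c2 r2 =>
      simp only [List.head?_cons, Option.some.injEq] at hhd
      subst hhd
      simp only [List.tail_cons] at ih ⊢
      simp only [sp_quote, List.head!_cons, List.tail_cons]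
      rw [goB_true_pair _ (sp_ne_nil r2)]
      simp [pvEsc, ih]
  | case3 inq rest hpair ih =>
    simp only [sp_quote, List.head!_cons, List.tail_cons]
    cases inq with
    | false =>
      simp only [Bool.not_false] at ih
      rw [sp_cons rest, goB_false]
      simp [ih]
    | true =>
      have hnot : ¬((sp rest).head! = [] ∧ (sp rest).tail ≠ []) := by
        rintro ⟨h1, h2⟩
        exact hpair ⟨sp_head_nil rest h1 h2, rfl⟩
      simp only [Bool.not_true] at ih
      rw [sp_cons rest, goB_true_close _ _ hnot]
      simp [pvEsc, ih]
  | case4 inq c rest hc hn ih =>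
    obtain ⟨hcn, hinq⟩ := hn
    subst hcn; subst hinq
    rw [sp_other _ _ hc]
    simp [pvEsc_cons, ih]
  | case5 inq c rest hc hn hr ih =>
    obtain ⟨hcr, hinq⟩ := hr
    subst hcr; subst hinq
    rw [sp_other _ _ hc]
    simp [pvEsc_cons, ih]
  | case6 inq c rest hc hn hr ih =>
    rw [sp_other _ _ hc]
    cases inq with
    | false => simp [ih]
    | true =>
      have hn' : ¬c = '\n' := fun h => hn ⟨h, rfl⟩
      have hr' : ¬c = '\r' := fun h => hr ⟨h, rfl⟩
      simp [pvEsc_cons, ih, hn', hr']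

-- ===== VERDICT (by name: the statement is the Claim_ definition above) =====
theorem fix_quoted_newlines_spec : Claim_equal_fix_quoted_newlines := by
  intro content _
  unfold Spec_fix_quoted_newlines fix_quoted_newlines fix_quoted_newlines_alt
  rw [splitOn_eq_sp, sp_cons content.toList]
  rw [fixA_eq_goB content.toList false]
  simp
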